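-- pv_equiv track=rewrite | github.com/allanRoberto/api-neural | routes/analise.py | calculate_minute_range
-- ===== SOURCE A (Python) =====
-- from typing import Dict, List, Optional
--
-- def calculate_minute_range(base_minute: int, minute_range: int, direction: str) -> List[int]:
--     """
--     Calcula a lista de minutos a buscar
--
--     Args:
--         base_minute: Minuto base (ex: 40)
--         minute_range: Intervalo (ex: 2)
--         direction: 'both', 'forward', 'backward'
--
--     Returns:
--         Lista de minutos (ex: [38, 39, 40, 41, 42])
--     """
--     minutes = [base_minute]
--
--     if direction in ['both', 'backward']:
--         # Adicionar minutos anteriores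
--         for i in range(1, minute_range + 1):
--             min_val = base_minute - i
--             if min_val >= 0:
--                 minutes.insert(0, min_val)
--
--     if direction in ['both', 'forward']:
--         # Adicionar minutos posteriores
--         for i in range(1, minute_range + 1):
--             min_val = base_minute + i
--             if min_val <= 59:
--                 minutes.append(min_val)
--
--     return minutes
-- ===== SOURCE B (Python) =====
-- def calculate_minute_range(base_minute: int, minute_range: int, direction: str):
--     r = max(minute_range, 0)
--     back = direction in ('both', 'backward')
--     fwd = direction in ('both', 'forward')
--     lo = base_minute - r if back else base_minute
--     hi = base_minute + r if fwd else base_minute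
--     return [m for m in range(lo, hi + 1)
--             if m == base_minute
--             or (m < base_minute and m >= 0)
--             or (m > base_minute and m <= 59)]
-- ===== Notes on version B (the rewrite author's own statement) =====
-- stated objective: alternative
-- what changed: Instead of growing the list around the base with two directional loops (prepend/append with per-side bound checks), B makes a single filtered scan over one contiguous window whose endpoints encode the direction, with one membership predicate doing the 0/59 clamping.
import Mathlib
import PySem

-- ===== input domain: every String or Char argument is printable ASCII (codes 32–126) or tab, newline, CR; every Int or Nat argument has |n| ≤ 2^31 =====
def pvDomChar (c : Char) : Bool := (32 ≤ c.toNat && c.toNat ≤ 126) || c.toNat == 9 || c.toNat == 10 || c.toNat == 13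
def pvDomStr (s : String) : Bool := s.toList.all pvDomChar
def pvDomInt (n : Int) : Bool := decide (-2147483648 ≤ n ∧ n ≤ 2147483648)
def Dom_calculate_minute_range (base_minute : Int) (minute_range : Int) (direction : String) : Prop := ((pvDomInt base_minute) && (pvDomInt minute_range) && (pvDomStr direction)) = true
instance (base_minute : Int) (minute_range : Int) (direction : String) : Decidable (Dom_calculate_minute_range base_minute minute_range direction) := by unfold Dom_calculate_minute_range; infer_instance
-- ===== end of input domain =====

-- B replaces A's two directional grow-the-list loops by a single filtered scan of the
-- symmetric window [base-r, base+r] with one membership predicate (objective: alternative).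
-- ===== PORT A =====
def calculate_minute_range (base_minute : Int) (minute_range : Int) (direction : String) : List Int :=
  let minutes : List Int := [base_minute]
  let minutes :=
    if direction = "both" ∨ direction = "backward" then
      (PySem.List.pyRange 1 (minute_range + 1) 1).foldl
        (fun acc i => let min_val := base_minute - i; if 0 ≤ min_val then min_val :: acc else acc) minutes
    else minutes
  let minutes :=
    if direction = "both" ∨ direction = "forward" then
      (PySem.List.pyRange 1 (minute_range + 1) 1).foldl
        (fun acc i => let min_val := base_minute + i; if min_val ≤ 59 then acc ++ [min_val] else acc) minutes
    else minutes
  minutes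

-- ===== PORT B =====
def calculate_minute_range_alt (base_minute : Int) (minute_range : Int) (direction : String) : List Int :=
  let r := max minute_range 0
  let back : Bool := direction == "both" || direction == "backward"
  let fwd : Bool := direction == "both" || direction == "forward"
  let lo := if back then base_minute - r else base_minute
  let hi := if fwd then base_minute + r else base_minute
  (PySem.List.pyRange lo (hi + 1) 1).filter
    (fun m => (m == base_minute)
      || (decide (m < base_minute) && decide (0 ≤ m))
      || (decide (base_minute < m) && decide (m ≤ 59)))

-- ===== PRECONDITION & SPEC =====
def Spec_calculate_minute_range (base_minute : Int) (minute_range : Int) (direction : String) (out : List Int) : Prop := out = calculate_minute_range_alt base_minute minute_range direction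
instance (base_minute : Int) (minute_range : Int) (direction : String) (out : List Int) : Decidable (Spec_calculate_minute_range base_minute minute_range direction out) := by unfold Spec_calculate_minute_range; infer_instance

-- ===== CLAIM =====
def Claim_equal_calculate_minute_range : Prop := ∀ (base_minute : Int) (minute_range : Int) (direction : String), Dom_calculate_minute_range base_minute minute_range direction → Spec_calculate_minute_range base_minute minute_range direction (calculate_minute_range base_minute minute_range direction)

-- ===== LEMMAS AND PROOFS =====
-- Canonical form both ports are reduced to: clamped backward segment, the base, clamped forward segment.
def pvCanon (b r : Int) (back fwd : Bool) : List Int :=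
  (if back then PySem.List.pyRange (max 0 (b - r)) b 1 else []) ++ [b] ++
  (if fwd then PySem.List.pyRange (b + 1) (min 59 (b + r) + 1) 1 else [])

-- Backward loop of A: prepending kept values yields the clamped ascending range.
theorem pv_back_nat (b : Int) : ∀ (n : Nat),
    (PySem.List.pyRange 1 ((n : Int) + 1) 1).foldl
      (fun acc i => if 0 ≤ b - i then (b - i) :: acc else acc) [b]
      = PySem.List.pyRange (max 0 (b - (n : Int))) b 1 ++ [b] := by
  intro n
  induction n with
  | zero =>
      rw [PySem.List.pyRange_one_eq_nil (by omega), PySem.List.pyRange_one_eq_nil (by omega)]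
      simp
  | succ n ih =>
      have hsplit : PySem.List.pyRange 1 (((n + 1 : Nat) : Int) + 1) 1
          = PySem.List.pyRange 1 ((n : Int) + 1) 1 ++ [(n : Int) + 1] := by
        have := PySem.List.pyRange_one_succ_right (a := 1) (b := (n : Int) + 1) (by omega)
        push_cast
        push_cast at this
        rw [this]
      rw [hsplit, List.foldl_append, ih]
      by_cases h : 0 ≤ b - ((n : Int) + 1)
      · have h1 : max 0 (b - ((n + 1 : Nat) : Int)) = b - ((n : Int) + 1) := by push_cast; omega
        have h2 : max 0 (b - (n : Int)) = b - (n : Int) := by omega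
        have hc := PySem.List.pyRange_one_cons (a := b - ((n : Int) + 1)) (b := b) (by omega)
        have he : b - ((n : Int) + 1) + 1 = b - (n : Int) := by ring
        rw [he] at hc
        rw [h1, h2, hc]
        simp only [List.foldl_cons, List.foldl_nil, if_pos h]
        simp
      · have h1 : max 0 (b - ((n + 1 : Nat) : Int)) = 0 := by push_cast; omega
        have h2 : max 0 (b - (n : Int)) = 0 := by omega
        simp only [List.foldl_cons, List.foldl_nil, if_neg h, h1, h2]

-- Forward loop of A, over an arbitrary accumulator.
theorem pv_fwd_nat (b : Int) : ∀ (n : Nat) (acc : List Int),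
    (PySem.List.pyRange 1 ((n : Int) + 1) 1).foldl
      (fun acc i => if b + i ≤ 59 then acc ++ [b + i] else acc) acc
      = acc ++ PySem.List.pyRange (b + 1) (min 59 (b + (n : Int)) + 1) 1 := by
  intro n
  induction n with
  | zero =>
      intro acc
      rw [PySem.List.pyRange_one_eq_nil (by omega), PySem.List.pyRange_one_eq_nil (by omega)]
      simp
  | succ n ih =>
      intro acc
      have hsplit : PySem.List.pyRange 1 (((n + 1 : Nat) : Int) + 1) 1
          = PySem.List.pyRange 1 ((n : Int) + 1) 1 ++ [(n : Int) + 1] := by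
        have := PySem.List.pyRange_one_succ_right (a := 1) (b := (n : Int) + 1) (by omega)
        push_cast
        push_cast at this
        rw [this]
      rw [hsplit, List.foldl_append, ih]
      by_cases h : b + ((n : Int) + 1) ≤ 59
      · have h1 : min 59 (b + ((n + 1 : Nat) : Int)) = b + ((n : Int) + 1) := by push_cast; omega
        have h2 : min 59 (b + (n : Int)) = b + (n : Int) := by omega
        have hc := PySem.List.pyRange_one_succ_right (a := b + 1) (b := b + (n : Int) + 1) (by omega)
        have he : b + ((n : Int) + 1) + 1 = b + (n : Int) + 1 + 1 := by ring
        have he2 : b + (n : Int) + 1 = b + ((n : Int) + 1) := by ring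
        rw [h1, h2, he, hc, he2]
        simp only [List.foldl_cons, List.foldl_nil, if_pos h]
        simp
      · have h1 : min 59 (b + ((n + 1 : Nat) : Int)) = 59 := by push_cast; omega
        have h2 : min 59 (b + (n : Int)) = 59 := by omega
        simp only [List.foldl_cons, List.foldl_nil, if_neg h, h1, h2]

theorem pv_back_int (b r : Int) :
    (PySem.List.pyRange 1 (r + 1) 1).foldl
      (fun acc i => if 0 ≤ b - i then (b - i) :: acc else acc) [b]
      = PySem.List.pyRange (max 0 (b - r)) b 1 ++ [b] := by
  by_cases hr : r ≤ 0
  · rw [PySem.List.pyRange_one_eq_nil (by omega), PySem.List.pyRange_one_eq_nil (by omega)]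
    simp
  · have : r = ((r.toNat : Nat) : Int) := by omega
    rw [this]; exact pv_back_nat b r.toNat

theorem pv_fwd_int (b r : Int) (acc : List Int) :
    (PySem.List.pyRange 1 (r + 1) 1).foldl
      (fun acc i => if b + i ≤ 59 then acc ++ [b + i] else acc) acc
      = acc ++ PySem.List.pyRange (b + 1) (min 59 (b + r) + 1) 1 := by
  by_cases hr : r ≤ 0
  · rw [PySem.List.pyRange_one_eq_nil (by omega), PySem.List.pyRange_one_eq_nil (by omega)]
    simp
  · have : r = ((r.toNat : Nat) : Int) := by omega
    rw [this]; exact pv_fwd_nat b r.toNat acc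

-- A equals the canonical three-segment form.
theorem pv_a_eq_canon (b r : Int) (d : String) :
    calculate_minute_range b r d
      = pvCanon b r (d == "both" || d == "backward") (d == "both" || d == "forward") := by
  unfold calculate_minute_range pvCanon
  by_cases hb : d = "both" ∨ d = "backward" <;> by_cases hf : d = "both" ∨ d = "forward" <;>
    simp only [hb, hf, ite_true, ite_false, pv_back_int, pv_fwd_int] <;>
    simp [hb, hf]

-- Filtering a range by the lower clamp 0 ≤ m moves the clamp into the start bound.
theorem pv_filter_low : ∀ (n : Nat) (a b : Int), (b - a).toNat = n →
    (PySem.List.pyRange a b 1).filter (fun m => decide (0 ≤ m))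
      = PySem.List.pyRange (max 0 a) b 1 := by
  intro n
  induction n with
  | zero =>
      intro a b h
      rw [PySem.List.pyRange_one_eq_nil (by omega), PySem.List.pyRange_one_eq_nil (by omega)]
      rfl
  | succ n ih =>
      intro a b h
      rw [PySem.List.pyRange_one_cons (by omega), List.filter_cons, ih (a + 1) b (by omega)]
      by_cases ha : 0 ≤ a
      · have h1 : max 0 a = a := by omega
        have h2 : max 0 (a + 1) = a + 1 := by omega
        rw [h1, h2, PySem.List.pyRange_one_cons (a := a) (b := b) (by omega)]
        simp [ha]
      · have h1 : max 0 a = 0 := by omega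
        have h2 : max 0 (a + 1) = max 0 a := by omega
        simp [ha, h1, h2]

-- Filtering a range by the upper clamp m ≤ 59 moves the clamp into the end bound.
theorem pv_filter_high : ∀ (n : Nat) (a c : Int), (c - a).toNat = n →
    (PySem.List.pyRange a c 1).filter (fun m => decide (m ≤ 59))
      = PySem.List.pyRange a (min c 60) 1 := by
  intro n
  induction n with
  | zero =>
      intro a c h
      rw [PySem.List.pyRange_one_eq_nil (by omega), PySem.List.pyRange_one_eq_nil (by omega)]
      rfl
  | succ n ih =>
      intro a c h
      rw [PySem.List.pyRange_one_cons (by omega), List.filter_cons, ih (a + 1) c (by omega)]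
      by_cases ha : a ≤ 59
      · rw [PySem.List.pyRange_one_cons (a := a) (b := min c 60) (by omega)]
        simp [ha]
      · rw [PySem.List.pyRange_one_eq_nil (a := a) (b := min c 60) (by omega),
            PySem.List.pyRange_one_eq_nil (a := a + 1) (b := min c 60) (by omega)]
        simp [ha]

-- One filtered scan of [lo, hi] splits into clamped left segment, base, clamped right segment.
theorem pv_scan (b lo hi : Int) (hlo : lo ≤ b) (hhi : b ≤ hi) :
    (PySem.List.pyRange lo (hi + 1) 1).filter
      (fun m => (m == b) || (decide (m < b) && decide (0 ≤ m)) || (decide (b < m) && decide (m ≤ 59)))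
      = PySem.List.pyRange (max 0 lo) b 1 ++ [b] ++ PySem.List.pyRange (b + 1) (min (hi + 1) 60) 1 := by
  rw [PySem.List.pyRange_one_append (a := lo) (m := b) (b := hi + 1) hlo (by omega),
      PySem.List.pyRange_one_cons (a := b) (b := hi + 1) (by omega),
      List.filter_append, List.filter_cons]
  have hmid : ((b == b) || (decide (b < b) && decide (0 ≤ b)) || (decide (b < b) && decide (b ≤ 59))) = true := by
    simp
  rw [hmid]
  have hleft : (PySem.List.pyRange lo b 1).filter
      (fun m => (m == b) || (decide (m < b) && decide (0 ≤ m)) || (decide (b < m) && decide (m ≤ 59)))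
      = PySem.List.pyRange (max 0 lo) b 1 := by
    have hcongr : (PySem.List.pyRange lo b 1).filter
        (fun m => (m == b) || (decide (m < b) && decide (0 ≤ m)) || (decide (b < m) && decide (m ≤ 59)))
        = (PySem.List.pyRange lo b 1).filter (fun m => decide (0 ≤ m)) := by
      apply List.filter_congr
      intro m hm
      rw [PySem.List.mem_pyRange_one] at hm
      have h1 : (m == b) = false := by simp; omega
      have h2 : decide (m < b) = true := by simp; omega
      have h3 : decide (b < m) = false := by simp; omega
      rw [h1, h2, h3]
      simp
    rw [hcongr]
    exact pv_filter_low (b - lo).toNat lo b rfl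
  have hright : (PySem.List.pyRange (b + 1) (hi + 1) 1).filter
      (fun m => (m == b) || (decide (m < b) && decide (0 ≤ m)) || (decide (b < m) && decide (m ≤ 59)))
      = PySem.List.pyRange (b + 1) (min (hi + 1) 60) 1 := by
    have hcongr : (PySem.List.pyRange (b + 1) (hi + 1) 1).filter
        (fun m => (m == b) || (decide (m < b) && decide (0 ≤ m)) || (decide (b < m) && decide (m ≤ 59)))
        = (PySem.List.pyRange (b + 1) (hi + 1) 1).filter (fun m => decide (m ≤ 59)) := by
      apply List.filter_congr
      intro m hm
      rw [PySem.List.mem_pyRange_one] at hm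
      have h1 : (m == b) = false := by simp; omega
      have h2 : decide (m < b) = false := by simp; omega
      have h3 : decide (b < m) = true := by simp; omega
      rw [h1, h2, h3]
      simp
    rw [hcongr]
    exact pv_filter_high (hi + 1 - (b + 1)).toNat (b + 1) (hi + 1) rfl
  rw [hleft, hright]
  simp

-- B equals the same canonical form.
theorem pv_alt_eq_canon (b r : Int) (d : String) :
    calculate_minute_range_alt b r d
      = pvCanon b r (d == "both" || d == "backward") (d == "both" || d == "forward") := by
  unfold calculate_minute_range_alt pvCanon
  cases hbk : (d == "both" || d == "backward") <;> cases hfw : (d == "both" || d == "forward") <;>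
    simp only [Bool.false_eq_true, if_true, if_false]
  · -- neither direction: the scan is just [b]
    rw [pv_scan b b b (by omega) (by omega)]
    have hL : PySem.List.pyRange (max 0 b) b 1 = ([] : List Int) :=
      PySem.List.pyRange_one_eq_nil (by omega)
    have hR : PySem.List.pyRange (b + 1) (min (b + 1) 60) 1 = ([] : List Int) :=
      PySem.List.pyRange_one_eq_nil (by omega)
    rw [hL, hR]
  · -- forward only
    rw [pv_scan b b (b + max r 0) (by omega) (by omega)]
    have hL : PySem.List.pyRange (max 0 b) b 1 = ([] : List Int) :=
      PySem.List.pyRange_one_eq_nil (by omega)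
    have hR : PySem.List.pyRange (b + 1) (min (b + max r 0 + 1) 60) 1
        = PySem.List.pyRange (b + 1) (min 59 (b + r) + 1) 1 := by
      by_cases hr : r ≤ 0
      · rw [PySem.List.pyRange_one_eq_nil (by omega), PySem.List.pyRange_one_eq_nil (by omega)]
      · have h1 : max r 0 = r := by omega
        have h2 : min (b + r + 1) 60 = min 59 (b + r) + 1 := by omega
        rw [h1, h2]
    rw [hL, hR]
  · -- backward only
    rw [pv_scan b (b - max r 0) b (by omega) (by omega)]
    have hR : PySem.List.pyRange (b + 1) (min (b + 1) 60) 1 = ([] : List Int) :=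
      PySem.List.pyRange_one_eq_nil (by omega)
    have hL : PySem.List.pyRange (max 0 (b - max r 0)) b 1
        = PySem.List.pyRange (max 0 (b - r)) b 1 := by
      by_cases hr : r ≤ 0
      · rw [PySem.List.pyRange_one_eq_nil (by omega), PySem.List.pyRange_one_eq_nil (by omega)]
      · have h1 : max r 0 = r := by omega
        rw [h1]
    rw [hL, hR]
  · -- both directions
    rw [pv_scan b (b - max r 0) (b + max r 0) (by omega) (by omega)]
    have hL : PySem.List.pyRange (max 0 (b - max r 0)) b 1
        = PySem.List.pyRange (max 0 (b - r)) b 1 := by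
      by_cases hr : r ≤ 0
      · rw [PySem.List.pyRange_one_eq_nil (by omega), PySem.List.pyRange_one_eq_nil (by omega)]
      · have h1 : max r 0 = r := by omega
        rw [h1]
    have hR : PySem.List.pyRange (b + 1) (min (b + max r 0 + 1) 60) 1
        = PySem.List.pyRange (b + 1) (min 59 (b + r) + 1) 1 := by
      by_cases hr : r ≤ 0
      · rw [PySem.List.pyRange_one_eq_nil (by omega), PySem.List.pyRange_one_eq_nil (by omega)]
      · have h1 : max r 0 = r := by omega
        have h2 : min (b + r + 1) 60 = min 59 (b + r) + 1 := by omega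
        rw [h1, h2]
    rw [hL, hR]

-- ===== VERDICT =====
theorem calculate_minute_range_spec : Claim_equal_calculate_minute_range := by
  intro b r d _
  unfold Spec_calculate_minute_range
  rw [pv_a_eq_canon, pv_alt_eq_canon]
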